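-- pv_equiv track=rewrite | github.com/dvp-git/Data-Struct-Jovian | Assignment3_v3.py | resolve_len
-- ===== SOURCE A (Python) =====
-- def resolve_len(poly1, poly2):
--     if len(poly1) < len(poly2):
--         poly1.append(0)
--         resolve_len(poly1, poly2)
--     elif len(poly2) < len(poly1):
--         poly2.append(0)
--         resolve_len(poly1, poly2)
--     return poly1,poly2
-- ===== SOURCE B (Python) =====
-- def resolve_len(poly1, poly2):
--     diff = len(poly1) - len(poly2)
--     if diff > 0:
--         poly2.extend([0] * diff)
--     elif diff < 0:
--         poly1.extend([0] * (-diff))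
--     return poly1, poly2
-- ===== Notes on version B (the rewrite author's own statement) =====
-- stated objective: simpler
-- what changed: Replaces the one-zero-per-recursive-call padding with a single computed length difference and one bulk extend of the shorter list (same in-place mutation and tuple return).
import Mathlib
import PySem

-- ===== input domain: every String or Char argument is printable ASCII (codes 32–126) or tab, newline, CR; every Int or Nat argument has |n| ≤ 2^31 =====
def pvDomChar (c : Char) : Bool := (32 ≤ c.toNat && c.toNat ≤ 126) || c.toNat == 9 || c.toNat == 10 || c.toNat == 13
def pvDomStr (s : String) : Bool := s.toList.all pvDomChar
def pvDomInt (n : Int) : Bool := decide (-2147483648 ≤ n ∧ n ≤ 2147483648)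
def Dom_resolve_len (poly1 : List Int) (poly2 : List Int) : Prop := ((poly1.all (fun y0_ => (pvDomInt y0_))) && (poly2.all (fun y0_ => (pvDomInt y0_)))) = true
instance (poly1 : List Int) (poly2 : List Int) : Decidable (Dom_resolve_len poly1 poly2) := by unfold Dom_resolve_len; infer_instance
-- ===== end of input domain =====

-- B pads the shorter list with one bulk extend of (length difference) zeros instead of
-- A's one-zero-per-recursive-call padding; objective: simpler. Both mutate the shorter
-- list in place in Python; the equivalence proved here is about the return value.


-- ===== PORT A =====
-- A recurses, appending one zero to the shorter list per call, until lengths are equal.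
def resolve_len (poly1 : List Int) (poly2 : List Int) : List Int × List Int :=
  if poly1.length < poly2.length then
    resolve_len (poly1 ++ [0]) poly2
  else if poly2.length < poly1.length then
    resolve_len poly1 (poly2 ++ [0])
  else
    (poly1, poly2)
termination_by (poly1.length - poly2.length) + (poly2.length - poly1.length)
decreasing_by all_goals simp_all; omega

-- ===== PORT B =====
-- B computes the length difference once and extends the shorter list with that many zeros.
def resolve_len_alt (poly1 : List Int) (poly2 : List Int) : List Int × List Int :=
  let diff : Int := (poly1.length : Int) - (poly2.length : Int)
  if diff > 0 then (poly1, poly2 ++ List.replicate diff.toNat 0)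
  else if diff < 0 then (poly1 ++ List.replicate (-diff).toNat 0, poly2)
  else (poly1, poly2)

-- ===== PRECONDITION & SPEC =====
def Spec_resolve_len (poly1 : List Int) (poly2 : List Int) (out : List Int × List Int) : Prop := out = resolve_len_alt poly1 poly2
instance (poly1 : List Int) (poly2 : List Int) (out : List Int × List Int) : Decidable (Spec_resolve_len poly1 poly2 out) := by unfold Spec_resolve_len; infer_instance

-- ===== CLAIM (what is proved, stated in full; the proofs are below) =====
def Claim_equal_resolve_len : Prop := ∀ (poly1 : List Int) (poly2 : List Int), Dom_resolve_len poly1 poly2 → Spec_resolve_len poly1 poly2 (resolve_len poly1 poly2)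

-- ===== LEMMAS AND PROOFS =====

-- padding one zero onto the shorter list does not change B's result
theorem alt_pad_left (p1 p2 : List Int) (h : p1.length < p2.length) :
    resolve_len_alt (p1 ++ [0]) p2 = resolve_len_alt p1 p2 := by
  simp only [resolve_len_alt, List.length_append, List.length_cons, List.length_nil]
  push_cast
  have h1 : ¬ ((p1.length : Int) + 1 - p2.length > 0) := by omega
  have h2 : ¬ ((p1.length : Int) - p2.length > 0) := by omega
  rw [if_neg h1, if_neg h2]
  by_cases he : (p1.length : Int) + 1 - p2.length < 0
  · have he' : (p1.length : Int) - p2.length < 0 := by omega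
    rw [if_pos he, if_pos he']
    have : (-((p1.length : Int) - p2.length)).toNat
        = (-((p1.length : Int) + 1 - p2.length)).toNat + 1 := by omega
    rw [this, List.replicate_succ, List.append_assoc]
    rfl
  · have he' : (p1.length : Int) - p2.length < 0 := by omega
    rw [if_neg he, if_pos he']
    have hn : p2.length - p1.length = 1 := by omega
    simp [hn]

theorem alt_pad_right (p1 p2 : List Int) (h : p2.length < p1.length) :
    resolve_len_alt p1 (p2 ++ [0]) = resolve_len_alt p1 p2 := by
  simp only [resolve_len_alt, List.length_append, List.length_cons, List.length_nil]
  push_cast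
  have hp : (p1.length : Int) - p2.length > 0 := by omega
  rw [if_pos hp]
  by_cases hg : (p1.length : Int) - (p2.length + 1) > 0
  · rw [if_pos hg]
    have : ((p1.length : Int) - p2.length).toNat
        = ((p1.length : Int) - ((p2.length : Int) + 1)).toNat + 1 := by omega
    rw [this, List.replicate_succ, List.append_assoc]
    rfl
  · have hz : ¬ ((p1.length : Int) - ((p2.length : Int) + 1) < 0) := by omega
    rw [if_neg hg, if_neg hz]
    have hn : p1.length - p2.length = 1 := by omega
    simp [hn]

theorem resolve_len_eq_alt (p1 p2 : List Int) : resolve_len p1 p2 = resolve_len_alt p1 p2 := by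
  fun_induction resolve_len p1 p2 with
  | case1 p1 p2 h ih => rw [ih, alt_pad_left p1 p2 h]
  | case2 p1 p2 _ h ih => rw [ih, alt_pad_right p1 p2 h]
  | case3 p1 p2 h1 h2 =>
    simp only [resolve_len_alt]
    have : ¬ ((p1.length : Int) - p2.length > 0) ∧ ¬ ((p1.length : Int) - p2.length < 0) := by
      constructor <;> omega
    rw [if_neg this.1, if_neg this.2]

-- ===== VERDICT (by name: the statement is the Claim_ definition above) =====
theorem resolve_len_spec : Claim_equal_resolve_len := by
  intro p1 p2 _
  unfold Spec_resolve_len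
  exact resolve_len_eq_alt p1 p2
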